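-- pv_equiv track=rewrite | github.com/kimdevspace/study-algorithm | 프로그래머스/2/77885. 2개 이하로 다른 비트/2개 이하로 다른 비트.py | solution
-- ===== SOURCE A (Python) =====
-- def solution(numbers):
--     answer = []
--     for num in numbers:
--         if num%2==1:
--             number='0'+bin(num)[2:]
--             number=number[:number.rindex('0')]+'10'+number[number.rindex('0')+2:]
--             answer.append(int(number,2))
--         else:
--             answer.append(num+1)
--     return answer
-- ===== SOURCE B (Python) =====
-- def _bump(num):
--     # lowest 0-bit of num as a power of two: adding 1 carries up to exactly here
--     z = ~num & (num + 1)
--     # set that bit, clear the bit right below it (for even num z == 1, z // 2 == 0)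
--     return num + z - z // 2
--
--
-- def solution(numbers):
--     return [_bump(num) for num in numbers]
-- ===== Notes on version B (the rewrite author's own statement) =====
-- stated objective: faster
-- what changed: Replaces the per-element binary-string construction (bin(), '0'-pad, rindex scan, slicing, int(...,2) re-parse) with branchless O(1) integer bit arithmetic: z = ~num & (num+1) is the lowest unset bit, and num + z - z//2 sets it and clears the bit below.
-- outside the precondition, e.g. on solution([-3]): A returns [11], B returns [-2]; on solution([-1]): A returns [5], B returns [-1]
import Mathlib
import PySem

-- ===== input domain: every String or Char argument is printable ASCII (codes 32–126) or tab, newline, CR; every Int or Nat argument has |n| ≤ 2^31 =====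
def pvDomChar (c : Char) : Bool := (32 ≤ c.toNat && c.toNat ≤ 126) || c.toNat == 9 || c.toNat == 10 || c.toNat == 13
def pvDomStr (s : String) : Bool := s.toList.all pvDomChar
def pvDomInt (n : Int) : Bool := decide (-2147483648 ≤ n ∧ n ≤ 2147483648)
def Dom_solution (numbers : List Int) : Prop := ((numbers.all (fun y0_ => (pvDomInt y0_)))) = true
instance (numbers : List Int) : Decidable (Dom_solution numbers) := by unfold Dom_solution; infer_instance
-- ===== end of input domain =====

-- B replaces A's per-element binary-string surgery (bin, '0'-pad, rindex scan, slice, re-parse)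
-- with branchless bit arithmetic on the integer itself.

-- ===== PORT A =====
-- int(s, 2): ported by hand as a digit fold; exact on nonempty strings of '0'/'1' digits with no
-- sign/space/underscore/'0b' prefix — the only strings the odd branch builds under Pre_ (num ≥ 0).
-- (PySem.Int.ofCharsBase? computes the same values, but its digit-fold helper is a private
-- definition, so no usable lemma about it can be stated; this hand fold is proof-transparent.)
def pvInt2 (cs : List Char) : Int :=
  cs.foldl (fun acc c => 2 * acc + (if c == '1' then 1 else 0)) 0

def solution (numbers : List Int) : List Int :=
  numbers.foldl (fun answer num =>
    if PySem.Int.mod num 2 == 1 then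
      -- number = '0' + bin(num)[2:]
      let number := '0' :: PySem.List.slice (PySem.Int.toBinChars0b num) (some 2) none
      -- number.rindex('0'): '0' always occurs (index 0), so rindex = rfind and never raises here
      let r := PySem.Chars.rfind number ['0']
      -- number[:r] + '10' + number[r+2:]
      let number2 := PySem.List.slice number none (some r) ++ ['1', '0'] ++
        PySem.List.slice number (some (r + 2)) none
      answer ++ [pvInt2 number2]
    else
      answer ++ [num + 1]) []

-- ===== PORT B =====
def pvBump (num : Int) : Int :=
  let z := PySem.Int.band (Int.not num) (num + 1)
  num + z - PySem.Int.floordiv z 2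

def solution_alt (numbers : List Int) : List Int := numbers.map pvBump

-- ===== PRECONDITION & SPEC =====
-- Pre_ restricts to the puzzle's natural domain (nonnegative numbers) by excluding lists with a
-- negative odd element: there A's string surgery runs over the '-0b' sign prefix that bin() emits
-- and returns a re-parse of it (e.g. [-3] ↦ [11]), while B returns the two's-complement analogue.
-- Negative even elements stay inside Pre_ (both sides return num+1 there).
def Pre_solution (numbers : List Int) : Prop := ∀ x ∈ numbers, 0 ≤ x ∨ PySem.Int.mod x 2 = 0
instance (numbers : List Int) : Decidable (Pre_solution numbers) := by unfold Pre_solution; infer_instance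
def pvWitness_solution : List Int := [1, 3, 6, 0, 8, -4]
def Spec_solution (numbers : List Int) (out : List Int) : Prop := out = solution_alt numbers
instance (numbers : List Int) (out : List Int) : Decidable (Spec_solution numbers out) := by unfold Spec_solution; infer_instance

-- ===== CLAIM (what is proved, stated in full; the proofs are below) =====
def Claim_equal_solution : Prop := ∀ (numbers : List Int), Dom_solution numbers → Pre_solution numbers → Spec_solution numbers (solution numbers)

-- ===== LEMMAS AND PROOFS =====

-- the per-element value of A's loop body
def pvStepA (num : Int) : Int :=
  if PySem.Int.mod num 2 == 1 then
    let number := '0' :: PySem.List.slice (PySem.Int.toBinChars0b num) (some 2) none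
    let r := PySem.Chars.rfind number ['0']
    let number2 := PySem.List.slice number none (some r) ++ ['1', '0'] ++
      PySem.List.slice number (some (r + 2)) none
    pvInt2 number2
  else num + 1

lemma solution_eq_map (numbers : List Int) : solution numbers = numbers.map pvStepA := by
  show numbers.foldl _ [] = _
  have h : (fun (answer : List Int) num =>
      if PySem.Int.mod num 2 == 1 then
        let number := '0' :: PySem.List.slice (PySem.Int.toBinChars0b num) (some 2) none
        let r := PySem.Chars.rfind number ['0']
        let number2 := PySem.List.slice number none (some r) ++ ['1', '0'] ++
          PySem.List.slice number (some (r + 2)) none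
        answer ++ [pvInt2 number2]
      else answer ++ [num + 1])
      = fun answer num => answer ++ [pvStepA num] := by
    funext answer num
    unfold pvStepA
    by_cases hc : (PySem.Int.mod num 2 == 1) = true
    · rw [if_pos hc, if_pos hc]
    · rw [if_neg hc, if_neg hc]
  rw [h, PySem.List.foldl_append_singleton_eq_map]
  rfl

-- ---- Nat bit lemmas ----

lemma and_succ_self_of_even (m : Nat) (hm : m % 2 = 0) : (m + 1) &&& m = m := by
  apply Nat.eq_of_testBit_eq
  intro i
  rw [Nat.testBit_and]
  cases i with
  | zero =>
    have h0 : m.testBit 0 = false := Nat.mod_two_eq_zero_iff_testBit_zero.mp hm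
    simp [h0]
  | succ j =>
    have h1 : (m + 1) / 2 = m / 2 := by omega
    rw [Nat.testBit_add_one, Nat.testBit_add_one, h1, Bool.and_self]

lemma odd_decomp (n : Nat) (hn : n % 2 = 1) :
    ∃ a k, 1 ≤ k ∧ n = 2 ^ (k + 1) * a + (2 ^ k - 1) := by
  induction n using Nat.strong_induction_on with
  | _ n ih =>
    rcases Nat.lt_or_ge n 4 with h4 | h4
    · have : n = 1 ∨ n = 3 := by omega
      rcases this with rfl | rfl
      · exact ⟨0, 1, by omega, by norm_num⟩
      · exact ⟨0, 2, by omega, by norm_num⟩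
    · by_cases he : n / 2 % 2 = 0
      · exact ⟨n / 4, 1, le_refl 1, by norm_num; omega⟩
      · have hm : n / 2 % 2 = 1 := by omega
        obtain ⟨a, k, hk, hrep⟩ := ih (n / 2) (by omega) hm
        refine ⟨a, k + 1, by omega, ?_⟩
        have h1 : 1 ≤ 2 ^ k := Nat.one_le_two_pow
        have key : 2 ^ (k + 1 + 1) * a = 2 * (2 ^ (k + 1) * a) := by ring
        have e2 : (2 : Nat) ^ (k + 1) = 2 * 2 ^ k := by ring
        rw [key]
        omega

lemma and_carry (a k : Nat) :
    (2 ^ (k + 1) * a + 2 ^ k) &&& (2 ^ (k + 1) * a + (2 ^ k - 1)) = 2 ^ (k + 1) * a := by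
  have h1 : 1 ≤ (2 : Nat) ^ k := Nat.one_le_two_pow
  have hk1 : (2 : Nat) ^ k < 2 ^ (k + 1) := by
    have e2 : (2 : Nat) ^ (k + 1) = 2 * 2 ^ k := by ring
    omega
  have hk2 : (2 : Nat) ^ k - 1 < 2 ^ (k + 1) := by omega
  have hz : (0 : Nat) < 2 ^ (k + 1) := by omega
  have hrhs : ∀ j, (2 ^ (k + 1) * a).testBit j
      = if j < k + 1 then false else a.testBit (j - (k + 1)) := by
    intro j
    have := Nat.testBit_two_pow_mul_add a hz j
    simpa using this
  apply Nat.eq_of_testBit_eq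
  intro j
  rw [Nat.testBit_and, hrhs j,
    Nat.testBit_two_pow_mul_add a hk1 j, Nat.testBit_two_pow_mul_add a hk2 j]
  rcases Nat.lt_or_ge j (k + 1) with hj | hj
  · rw [if_pos hj, if_pos hj, if_pos hj, Nat.testBit_two_pow, Nat.testBit_two_pow_sub_one]
    rcases Nat.lt_or_ge j k with h | h
    · simp; omega
    · simp; omega
  · rw [if_neg (by omega), if_neg (by omega), if_neg (by omega), Bool.and_self]

-- ---- B-side: the value of z = ~num & (num+1) ----

lemma band_not_nonneg (m : Nat) : PySem.Int.band (Int.not (m : Int)) ((m : Int) + 1)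
    = (((m + 1) - ((m + 1) &&& m) : Nat) : Int) := by
  have h1 : Int.not (m : Int) = Int.negSucc m := rfl
  rw [h1, Int.negSucc_eq]
  unfold PySem.Int.band
  rw [if_neg (by omega), if_pos (by omega)]
  have e1 : (-(-((m : Int) + 1)) - 1) = (m : Int) := by ring
  rw [e1]
  have e2 : ((m : Int) + 1).toNat = m + 1 := by omega
  have e3 : ((m : Int)).toNat = m := by omega
  rw [e2, e3]

lemma band_not_neg (n : Int) (hn : n ≤ -2) : PySem.Int.band (Int.not n) (n + 1)
    = ((((-n - 1).toNat) - (((-n - 1).toNat) &&& ((-n - 2).toNat)) : Nat) : Int) := by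
  cases n with
  | ofNat k =>
    exfalso
    have : (0 : Int) ≤ Int.ofNat k := Int.natCast_nonneg k
    omega
  | negSucc m =>
    have hm : 1 ≤ m := by
      have := Int.negSucc_eq m
      omega
    have h1 : Int.not (Int.negSucc m) = (m : Int) := rfl
    have hb : Int.negSucc m + 1 = -(m : Int) := by rw [Int.negSucc_eq]; ring
    rw [h1, hb]
    unfold PySem.Int.band
    rw [if_pos (by omega), if_neg (by omega)]
    have e1 : ((m : Int)).toNat = m := by omega
    have e2 : (-(-(m : Int)) - 1).toNat = m - 1 := by omega
    have e3 : (-(Int.negSucc m) - 1).toNat = m := by rw [Int.negSucc_eq]; omega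
    have e4 : (-(Int.negSucc m) - 2).toNat = m - 1 := by rw [Int.negSucc_eq]; omega
    rw [e1, e2, e3, e4]

lemma pvBump_even (n : Int) (hn : PySem.Int.mod n 2 = 0) : pvBump n = n + 1 := by
  have hemod : n % 2 = 0 := by
    rw [PySem.Int.mod_eq_emod_of_pos (by norm_num)] at hn
    exact hn
  unfold pvBump
  by_cases h0 : 0 ≤ n
  · obtain ⟨m, rfl⟩ : ∃ m : Nat, n = (m : Int) := ⟨n.toNat, (Int.toNat_of_nonneg h0).symm⟩
    have hm : m % 2 = 0 := by omega
    rw [band_not_nonneg m, and_succ_self_of_even m hm]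
    norm_num
  · have h2 : n ≤ -2 := by omega
    rw [band_not_neg n h2]
    have hme : (-n - 2).toNat % 2 = 0 := by omega
    have hsucc : (-n - 1).toNat = (-n - 2).toNat + 1 := by omega
    rw [hsucc, and_succ_self_of_even _ hme]
    norm_num

lemma pvBump_odd (a k : Nat) (hk : 1 ≤ k) :
    pvBump ((2 ^ (k + 1) * a + (2 ^ k - 1) : Nat) : Int)
      = ((2 ^ (k + 1) * a + 2 ^ k + (2 ^ (k - 1) - 1) : Nat) : Int) := by
  have h1 : 1 ≤ (2 : Nat) ^ (k - 1) := Nat.one_le_two_pow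
  have ek : (2 : Nat) ^ k = 2 * 2 ^ (k - 1) := by
    conv_lhs => rw [show k = (k - 1) + 1 by omega]
    ring
  simp only [pvBump]
  rw [band_not_nonneg (2 ^ (k + 1) * a + (2 ^ k - 1))]
  have e1 : 2 ^ (k + 1) * a + (2 ^ k - 1) + 1 = 2 ^ (k + 1) * a + 2 ^ k := by
    have : 1 ≤ (2 : Nat) ^ k := by omega
    omega
  rw [e1, and_carry a k]
  have e2 : 2 ^ (k + 1) * a + 2 ^ k - 2 ^ (k + 1) * a = (2 : Nat) ^ k := by omega
  rw [e2]
  have e3 : PySem.Int.floordiv (((2 : Nat) ^ k : Nat) : Int) 2 = (((2 : Nat) ^ (k - 1) : Nat) : Int) := by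
    rw [PySem.Int.floordiv_eq_ediv_of_pos (by norm_num)]
    omega
  rw [e3]
  have e4 : (2 : Nat) ^ (k + 1) = 2 * 2 ^ k := by ring
  omega

-- ---- A-side: recurrence for Nat.toDigits 2 ----

lemma toDigitsCore_acc (f : Nat) : ∀ (n : Nat) (ds : List Char),
    Nat.toDigitsCore 2 f n ds = Nat.toDigitsCore 2 f n [] ++ ds := by
  induction f with
  | zero => intro n ds; rw [Nat.toDigitsCore, Nat.toDigitsCore]; rfl
  | succ f ih =>
    intro n ds
    rw [Nat.toDigitsCore]
    conv_rhs => rw [Nat.toDigitsCore]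
    by_cases h : n / 2 = 0
    · simp [h]
    · simp only [h, if_false]
      rw [ih (n / 2) ((n % 2).digitChar :: ds), ih (n / 2) [(n % 2).digitChar]]
      simp

lemma toDigitsCore_fuel (f : Nat) : ∀ (f' n : Nat), n < f → n < f' →
    Nat.toDigitsCore 2 f n [] = Nat.toDigitsCore 2 f' n [] := by
  induction f with
  | zero => intro f' n h; omega
  | succ f ih =>
    intro f' n h h'
    cases f' with
    | zero => omega
    | succ f' =>
      rw [Nat.toDigitsCore]
      conv_rhs => rw [Nat.toDigitsCore]
      by_cases h0 : n / 2 = 0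
      · simp [h0]
      · simp only [h0, if_false]
        rw [toDigitsCore_acc f, toDigitsCore_acc f']
        rw [ih f' (n / 2) (by omega) (by omega)]

lemma toDigits_two_rec (n : Nat) (hn : 2 ≤ n) :
    Nat.toDigits 2 n = Nat.toDigits 2 (n / 2) ++ [(n % 2).digitChar] := by
  show Nat.toDigitsCore 2 (n + 1) n [] = Nat.toDigitsCore 2 (n / 2 + 1) (n / 2) [] ++ _
  rw [Nat.toDigitsCore]
  have h0 : ¬ n / 2 = 0 := by omega
  simp only [h0, if_false]
  rw [toDigitsCore_acc n]
  rw [toDigitsCore_fuel n (n / 2 + 1) (n / 2) (by omega) (by omega)]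

-- shape of '0' + bin(n) for odd n = 2^(k+1)*a + 2^k - 1: a leading part (empty, or '0' followed
-- by the digits of a ≥ 1), then the LAST '0', then the k trailing '1's
def pvPre (a : Nat) : List Char := if a = 0 then [] else '0' :: Nat.toDigits 2 a

lemma digits_shape (k : Nat) (hk : 1 ≤ k) : ∀ a : Nat,
    '0' :: Nat.toDigits 2 (2 ^ (k + 1) * a + (2 ^ k - 1))
      = pvPre a ++ '0' :: List.replicate k '1' := by
  induction k with
  | zero => omega
  | succ k ih =>
    intro a
    by_cases hk0 : k = 0
    · subst hk0
      -- n = 4a + 1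
      have e0 : 2 ^ (0 + 1 + 1) * a + (2 ^ (0 + 1) - 1) = 4 * a + 1 := by norm_num
      rw [e0]
      by_cases ha : a = 0
      · subst ha
        simp only [pvPre]
        decide
      · have h2 : 2 ≤ 4 * a + 1 := by omega
        rw [toDigits_two_rec _ h2]
        have e1 : (4 * a + 1) / 2 = 2 * a := by omega
        have e2 : (4 * a + 1) % 2 = 1 := by omega
        rw [e1, e2, toDigits_two_rec (2 * a) (by omega)]
        have e3 : 2 * a / 2 = a := by omega
        have e4 : 2 * a % 2 = 0 := by omega
        rw [e3, e4]
        simp only [pvPre, if_neg ha]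
        have d0 : Nat.digitChar 0 = '0' := rfl
        have d1 : Nat.digitChar 1 = '1' := rfl
        rw [d0, d1]
        simp
    · have hk1 : 1 ≤ k := by omega
      -- n = 2*m + 1 with m = 2^(k+1)*a + 2^k - 1
      have h1 : 1 ≤ (2 : Nat) ^ k := Nat.one_le_two_pow
      have ekey : 2 ^ (k + 1 + 1) * a = 2 * (2 ^ (k + 1) * a) := by ring
      have e2 : (2 : Nat) ^ (k + 1) = 2 * 2 ^ k := by ring
      have h2k : 2 ≤ (2 : Nat) ^ k := by
        calc (2 : Nat) = 2 ^ 1 := by norm_num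
        _ ≤ 2 ^ k := Nat.pow_le_pow_right (by norm_num) hk1
      have hn2 : 2 ≤ 2 ^ (k + 1 + 1) * a + (2 ^ (k + 1) - 1) := by
        rw [ekey]; omega
      rw [toDigits_two_rec _ hn2]
      have ediv : (2 ^ (k + 1 + 1) * a + (2 ^ (k + 1) - 1)) / 2 = 2 ^ (k + 1) * a + (2 ^ k - 1) := by
        rw [ekey]; omega
      have emod : (2 ^ (k + 1 + 1) * a + (2 ^ (k + 1) - 1)) % 2 = 1 := by
        rw [ekey]; omega
      rw [ediv, emod]
      have hshape := ih hk1 a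
      calc '0' :: (Nat.toDigits 2 (2 ^ (k + 1) * a + (2 ^ k - 1)) ++ [(1 : Nat).digitChar])
          = ('0' :: Nat.toDigits 2 (2 ^ (k + 1) * a + (2 ^ k - 1))) ++ ['1'] := by rfl
        _ = (pvPre a ++ '0' :: List.replicate k '1') ++ ['1'] := by rw [hshape]
        _ = pvPre a ++ '0' :: (List.replicate k '1' ++ ['1']) := by simp
        _ = pvPre a ++ '0' :: List.replicate (k + 1) '1' := by rw [← List.replicate_succ']

-- ---- rfind: the last '0' sits right before the trailing '1's ----

lemma rfind_go_succ (s sub : List Char) (j : Nat) : PySem.Chars.rfind.go s sub (j + 1)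
    = (if sub.isPrefixOf (s.drop (j + 1)) then ((j : Int) + 1) else PySem.Chars.rfind.go s sub j) := by
  conv_lhs => rw [PySem.Chars.rfind.go]
  push_cast
  ring_nf

lemma isPrefixOf_zero_cons (c : Char) (l : List Char) :
    ['0'].isPrefixOf (c :: l) = (c == '0') := by
  simp [List.isPrefixOf]
  constructor
  · intro h; exact h.symm
  · intro h; exact h.symm

lemma rfind_go_eval (pre suf : List Char) (hsuf : ∀ c ∈ suf, c = '1') :
    ∀ x, pre.length ≤ x → x ≤ (pre ++ '0' :: suf).length →
      PySem.Chars.rfind.go (pre ++ '0' :: suf) ['0'] x = (pre.length : Int) := by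
  intro x
  induction x with
  | zero =>
    intro hlo _
    have hpre : pre = [] := List.eq_nil_of_length_eq_zero (by omega)
    subst hpre
    rw [PySem.Chars.rfind.go]
    simp [List.isPrefixOf]
  | succ j ih =>
    intro hlo hhi
    rw [rfind_go_succ]
    by_cases heq : pre.length = j + 1
    · have hdrop : (pre ++ '0' :: suf).drop (j + 1) = '0' :: suf := by
        rw [← heq, List.drop_append]
        simp
      rw [hdrop, isPrefixOf_zero_cons]
      simp [heq]
    · have hle : pre.length ≤ j := by omega
      have hdrop : (pre ++ '0' :: suf).drop (j + 1) = suf.drop (j - pre.length) := by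
        rw [List.drop_append, List.drop_eq_nil_of_le (by omega)]
        rw [show j + 1 - pre.length = (j - pre.length) + 1 by omega]
        rfl
      have hfalse : (['0'].isPrefixOf ((pre ++ '0' :: suf).drop (j + 1))) = false := by
        rw [hdrop]
        cases hd : suf.drop (j - pre.length) with
        | nil => rfl
        | cons c t =>
          rw [isPrefixOf_zero_cons]
          have hc : c ∈ suf := List.mem_of_mem_drop (by rw [hd]; exact List.mem_cons_self)
          rw [hsuf c hc]
          rfl
      rw [hfalse]
      simp only [Bool.false_eq_true, if_false]
      exact ih hle (by omega)

lemma rfind_last_zero (pre suf : List Char) (hsuf : ∀ c ∈ suf, c = '1') :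
    PySem.Chars.rfind (pre ++ '0' :: suf) ['0'] = (pre.length : Int) := by
  show PySem.Chars.rfind.go _ _ _ = _
  exact rfind_go_eval pre suf hsuf _ (by simp) le_rfl

-- ---- pvInt2 values ----

lemma pvInt2_acc (cs : List Char) : ∀ acc : Int,
    cs.foldl (fun acc c => 2 * acc + (if c == '1' then 1 else 0)) acc
      = acc * 2 ^ cs.length + pvInt2 cs := by
  induction cs with
  | nil => intro acc; simp [pvInt2]
  | cons c cs ih =>
    intro acc
    show List.foldl _ (2 * acc + _) cs = _
    rw [ih (2 * acc + if c == '1' then 1 else 0)]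
    have h2 : pvInt2 (c :: cs) = (if c == '1' then 1 else 0) * 2 ^ cs.length + pvInt2 cs := by
      show List.foldl _ (2 * 0 + _) cs = _
      rw [ih (2 * 0 + if c == '1' then 1 else 0)]
      ring
    rw [h2]
    simp only [List.length_cons, pow_succ]
    ring

lemma pvInt2_append (xs ys : List Char) :
    pvInt2 (xs ++ ys) = pvInt2 xs * 2 ^ ys.length + pvInt2 ys := by
  show (xs ++ ys).foldl _ 0 = _
  rw [List.foldl_append, pvInt2_acc ys (xs.foldl _ 0)]
  rfl

lemma pvInt2_toDigits (n : Nat) (hn : 1 ≤ n) : pvInt2 (Nat.toDigits 2 n) = (n : Int) := by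
  induction n using Nat.strong_induction_on with
  | _ n ih =>
    by_cases h1 : n = 1
    · subst h1; decide
    · have h2 : 2 ≤ n := by omega
      rw [toDigits_two_rec n h2, pvInt2_append, ih (n / 2) (by omega) (by omega)]
      have hd : pvInt2 [(n % 2).digitChar] = ((n % 2 : Nat) : Int) := by
        have : n % 2 = 0 ∨ n % 2 = 1 := by omega
        rcases this with h | h <;> rw [h] <;> decide
      rw [hd]
      simp only [List.length_singleton, pow_one]
      omega

lemma pvInt2_replicate (j : Nat) : pvInt2 (List.replicate j '1') = 2 ^ j - 1 := by
  induction j with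
  | zero => decide
  | succ j ih =>
    rw [List.replicate_succ']
    rw [pvInt2_append, ih]
    have : pvInt2 ['1'] = 1 := by decide
    rw [this]
    simp only [List.length_singleton, pow_one]
    ring

lemma pvInt2_pvPre (a : Nat) : pvInt2 (pvPre a) = (a : Int) := by
  by_cases ha : a = 0
  · subst ha; simp [pvPre, pvInt2]
  · unfold pvPre
    rw [if_neg ha]
    have : pvInt2 ('0' :: Nat.toDigits 2 a) = pvInt2 (Nat.toDigits 2 a) := by
      unfold pvInt2
      simp only [List.foldl_cons]
      norm_num
      rw [if_neg (show ¬ ('0' : Char) = '1' by decide)]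
    rw [this, pvInt2_toDigits a (by omega)]

-- ---- per-element equivalence ----

lemma step_eq (num : Int) (h : 0 ≤ num ∨ PySem.Int.mod num 2 = 0) :
    pvStepA num = pvBump num := by
  by_cases hodd : PySem.Int.mod num 2 = 1
  · -- odd branch: num ≥ 0 here
    have hnn : 0 ≤ num := by
      rcases h with h | h
      · exact h
      · rw [h] at hodd; exact absurd hodd (by norm_num)
    obtain ⟨N, rfl⟩ : ∃ N : Nat, num = (N : Int) := ⟨num.toNat, (Int.toNat_of_nonneg hnn).symm⟩
    have hN : N % 2 = 1 := by
      have := PySem.Int.mod_natCast N 2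
      rw [show ((2 : Nat) : Int) = (2 : Int) by norm_num] at this
      rw [this] at hodd
      exact_mod_cast hodd
    obtain ⟨a, k, hk, rfl⟩ := odd_decomp N hN
    simp only [pvStepA]
    rw [if_pos (by rw [hodd]; rfl)]
    -- bin(num)[2:] = toDigits 2 N
    have hbin : PySem.List.slice (PySem.Int.toBinChars0b ((2 ^ (k + 1) * a + (2 ^ k - 1) : Nat) : Int)) (some 2) none
        = Nat.toDigits 2 (2 ^ (k + 1) * a + (2 ^ k - 1)) := by
      unfold PySem.Int.toBinChars0b
      rw [if_neg (by omega)]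
      rw [PySem.List.slice_from _ (by norm_num : (0 : Int) ≤ 2)]
      rw [show ((2 : Int)).toNat = 2 from rfl]
      rw [show (((2 ^ (k + 1) * a + (2 ^ k - 1) : Nat) : Int)).toNat
        = 2 ^ (k + 1) * a + (2 ^ k - 1) by omega]
      rfl
    rw [hbin, digits_shape k hk a]
    have hsuf : ∀ c ∈ List.replicate k '1', c = '1' := fun c hc => List.eq_of_mem_replicate hc
    rw [rfind_last_zero (pvPre a) (List.replicate k '1') hsuf]
    -- slices
    have hslice1 : PySem.List.slice (pvPre a ++ '0' :: List.replicate k '1') none (some ((pvPre a).length : Int))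
        = pvPre a := by
      rw [PySem.List.slice_to _ (by omega)]
      rw [show (((pvPre a).length : Int)).toNat = (pvPre a).length by omega]
      exact List.take_left
    have hsplit : pvPre a ++ '0' :: List.replicate k '1'
        = (pvPre a ++ ['0', '1']) ++ List.replicate (k - 1) '1' := by
      have : List.replicate k '1' = '1' :: List.replicate (k - 1) '1' := by
        rw [show k = (k - 1) + 1 by omega]; rfl
      rw [this]
      simp
    have hslice2 : PySem.List.slice (pvPre a ++ '0' :: List.replicate k '1') (some (((pvPre a).length : Int) + 2)) none
        = List.replicate (k - 1) '1' := by
      rw [PySem.List.slice_from _ (by omega)]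
      rw [show ((((pvPre a).length : Int)) + 2).toNat = (pvPre a).length + 2 by omega]
      rw [hsplit]
      rw [show (pvPre a).length + 2 = (pvPre a ++ ['0', '1']).length by simp]
      exact List.drop_left
    rw [hslice1, hslice2]
    -- the parsed value
    have hval : pvInt2 (pvPre a ++ ['1', '0'] ++ List.replicate (k - 1) '1')
        = ((2 ^ (k + 1) * a + 2 ^ k + (2 ^ (k - 1) - 1) : Nat) : Int) := by
      rw [pvInt2_append, pvInt2_append, pvInt2_pvPre, pvInt2_replicate]
      have h10 : pvInt2 ['1', '0'] = 2 := by decide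
      rw [h10]
      have h1 : 1 ≤ (2 : Nat) ^ (k - 1) := Nat.one_le_two_pow
      have ek : (2 : Nat) ^ k = 2 * 2 ^ (k - 1) := by
        conv_lhs => rw [show k = (k - 1) + 1 by omega]
        ring
      have ek1 : (2 : Nat) ^ (k + 1) = 4 * 2 ^ (k - 1) := by
        conv_lhs => rw [show k + 1 = (k - 1) + 2 by omega]
        ring
      have ik : ((2 : Int)) ^ k = 2 * 2 ^ (k - 1) := by
        conv_lhs => rw [show k = (k - 1) + 1 by omega]
        ring
      have ik1 : ((2 : Int)) ^ (k + 1) = 4 * 2 ^ (k - 1) := by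
        conv_lhs => rw [show k + 1 = (k - 1) + 2 by omega]
        ring
      simp only [List.length_replicate, List.length_cons, List.length_nil]
      push_cast [Nat.cast_sub h1]
      rw [ik, ik1]
      ring
    rw [hval, pvBump_odd a k hk]
  · -- even branch
    have hmod : PySem.Int.mod num 2 = 0 := by
      have hlt := PySem.Int.mod_lt (a := num) (b := 2) (by norm_num)
      have hge := PySem.Int.mod_nonneg (a := num) (b := 2) (by norm_num)
      omega
    simp only [pvStepA]
    rw [if_neg (by rw [hmod]; decide)]
    exact (pvBump_even num hmod).symm

-- ===== VERDICT (by name: the statement is the Claim_ definition above) =====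
theorem solution_spec : Claim_equal_solution := by
  intro numbers _ hpre
  show solution numbers = solution_alt numbers
  rw [solution_eq_map]
  unfold solution_alt
  apply List.map_congr_left
  intro x hx
  exact step_eq x (hpre x hx)
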